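-- pv_equiv track=rewrite | github.com/petteriTeikari/deep-biblio-tools | scripts/merge_deduplicate_bibtex.py | extract_identifiers
-- ===== SOURCE A (Python) =====
-- def normalize_title(title: str) -> str:
--     """Normalize title for comparison."""
--     # Remove LaTeX formatting (braces)
--     result = ""
--     i = 0
--     while i < len(title):
--         if title[i] == "{":
--             # Find matching close brace
--             brace_count = 1
--             i += 1
--             while i < len(title) and brace_count > 0:
--                 if title[i] == "{":
--                     brace_count += 1
--                 elif title[i] == "}":
--                     brace_count -= 1
--                 else:
--                     result += title[i]
--                 i += 1
--         elif title[i] != "}":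
--             result += title[i]
--             i += 1
--         else:
--             i += 1
--
--     # Remove punctuation and convert to lowercase
--     cleaned = ""
--     for char in result.lower():
--         if char.isalnum() or char.isspace():
--             cleaned += char
--
--     # Normalize whitespace
--     return " ".join(cleaned.split())
--
-- def extract_identifiers(entry: dict) -> tuple[str | None, str | None, str]:
--     """Extract DOI, URL, and normalized title from entry."""
--     doi = entry.get("doi", "").strip()
--     url = entry.get("url", "").strip()
--
--     # Also check for DOI in URL
--     if not doi and url:
--         doi_prefix = "doi.org/"
--         doi_start = url.find(doi_prefix)
--         if doi_start != -1:
--             doi_start += len(doi_prefix)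
--             # Find the end of DOI (space or end of string)
--             doi_end = doi_start
--             while doi_end < len(url) and not url[doi_end].isspace():
--                 doi_end += 1
--             doi = url[doi_start:doi_end]
--
--     # Normalize title
--     title = normalize_title(entry.get("title", ""))
--
--     return doi, url, title
-- ===== SOURCE B (Python) =====
-- def normalize_title(title: str) -> str:
--     """Normalize title for comparison.
--
--     The brace-matching state machine of the original is unnecessary: it only
--     ever deletes '{' and '}', and those are deleted anyway by the
--     alphanumeric/whitespace filter.  One filtering pass suffices.
--     """
--     cleaned = "".join(c for c in title.lower() if c.isalnum() or c.isspace())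
--     return " ".join(cleaned.split())
--
--
-- def extract_identifiers(entry: dict) -> tuple[str | None, str | None, str]:
--     """Extract DOI, URL, and normalized title from entry."""
--     doi = entry.get("doi", "").strip()
--     url = entry.get("url", "").strip()
--
--     if not doi and url:
--         pos = url.find("doi.org/")
--         if pos != -1:
--             tail = url[pos + len("doi.org/"):]
--             end = next((k for k, ch in enumerate(tail) if ch.isspace()), len(tail))
--             doi = tail[:end]
--
--     return doi, url, normalize_title(entry.get("title", ""))
-- ===== Notes on version B (the rewrite author's own statement) =====
-- stated objective: simpler
-- what changed: normalize_title's nested while-loop brace-matching state machine is removed entirely: since it only deletes '{'/'}' characters, which the subsequent isalnum/isspace filter deletes anyway, B lowercases and filters in a single pass; the DOI-in-URL extraction scans the tail with a non-space prefix instead of an index-incrementing while loop.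
import Mathlib
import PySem

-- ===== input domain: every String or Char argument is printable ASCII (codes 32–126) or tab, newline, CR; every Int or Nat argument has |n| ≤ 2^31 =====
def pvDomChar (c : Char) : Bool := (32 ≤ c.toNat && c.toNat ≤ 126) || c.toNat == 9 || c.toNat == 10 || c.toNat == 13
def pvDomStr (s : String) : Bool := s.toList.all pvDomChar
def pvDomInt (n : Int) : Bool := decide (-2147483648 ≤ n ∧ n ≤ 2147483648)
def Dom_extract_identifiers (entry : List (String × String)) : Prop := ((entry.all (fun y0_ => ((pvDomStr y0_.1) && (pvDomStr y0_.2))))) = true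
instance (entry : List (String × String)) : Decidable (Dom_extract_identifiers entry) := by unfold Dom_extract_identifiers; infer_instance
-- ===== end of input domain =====

-- B removes normalize_title's nested brace-matching while loops (the isalnum/isspace filter
-- already deletes braces) and takes the non-space prefix of the URL tail instead of an index
-- scan: a simpler single-pass normalization with the same result.


-- ===== PORT A =====
-- inner while loop of normalize_title: consumes chars while brace_count > 0, returning
-- (the non-brace chars it appended to result, the chars remaining after the loop)
def pvAInner : List Char → Nat → (List Char × List Char)
  | [], _ => ([], [])
  | c :: t, bc =>
    if c = '{' then pvAInner t (bc + 1)
    else if c = '}' then (if bc ≤ 1 then ([], t) else pvAInner t (bc - 1))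
    else
      let p := pvAInner t bc
      (c :: p.1, p.2)

-- termination measure for the outer loop: the inner loop never moves i backwards
theorem pvAInner_rest_le : ∀ (t : List Char) (bc : Nat), (pvAInner t bc).2.length ≤ t.length := by
  intro t
  induction t with
  | nil => intro bc; simp [pvAInner]
  | cons c t ih =>
    intro bc
    simp only [pvAInner]
    split_ifs with h1 h2 h3
    · exact le_trans (ih _) (Nat.le_succ _)
    · simp
    · exact le_trans (ih _) (Nat.le_succ _)
    · simpa using le_trans (ih bc) (Nat.le_succ _)

-- outer while loop of normalize_title (LaTeX brace removal)
def pvAOuter : List Char → List Char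
  | [] => []
  | c :: t =>
    if c = '{' then
      let p := pvAInner t 1
      p.1 ++ pvAOuter p.2
    else if c ≠ '}' then c :: pvAOuter t
    else pvAOuter t
termination_by l => l.length
decreasing_by
  · exact Nat.lt_succ_of_le (pvAInner_rest_le t 1)
  · simp
  · simp

-- 'for char in result.lower(): if char.isalnum() or char.isspace(): cleaned += char'
def pvAClean (cs : List Char) : List Char :=
  (PySem.Chars.lower cs).foldl
    (fun acc c => if PySem.Chars.isalnum c || PySem.Chars.isspace c then acc ++ [c] else acc) []

def pvANormalizeTitle (s : String) : String :=
  String.ofList (PySem.Chars.join [' '] (PySem.Chars.split₀ (pvAClean (pvAOuter s.toList))))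

-- 'while doi_end < len(url) and not url[doi_end].isspace(): doi_end += 1', counted on the
-- chars from position doi_start (i.e. doi_end - doi_start)
def pvAScan : List Char → Nat
  | [] => 0
  | c :: t => if PySem.Chars.isspace c then 0 else pvAScan t + 1

def extract_identifiers (entry : List (String × String)) : String × String × String :=
  let doi := PySem.Str.strip (PySem.Dict.getD ⟨entry⟩ "doi" "")
  let url := PySem.Str.strip (PySem.Dict.getD ⟨entry⟩ "url" "")
  let doi :=
    if doi.toList = [] ∧ url.toList ≠ [] then
      let pos := PySem.Chars.find url.toList "doi.org/".toList
      if pos ≠ -1 then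
        let start := pos + 8           -- doi_start += len("doi.org/")
        let n := pvAScan (url.toList.drop start.toNat)
        String.ofList (PySem.List.slice url.toList (some start) (some (start + (n : Int))))
      else doi
    else doi
  (doi, url, pvANormalizeTitle (PySem.Dict.getD ⟨entry⟩ "title" ""))

-- ===== PORT B =====
-- single filtering pass: lowercase, keep alnum/space, re-join on whitespace
def pvBNormalizeTitle (s : String) : String :=
  let cleaned := (PySem.Chars.lower s.toList).filter
    (fun c => PySem.Chars.isalnum c || PySem.Chars.isspace c)
  String.ofList (PySem.Chars.join [' '] (PySem.Chars.split₀ cleaned))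

def extract_identifiers_alt (entry : List (String × String)) : String × String × String :=
  let doi := PySem.Str.strip (PySem.Dict.getD ⟨entry⟩ "doi" "")
  let url := PySem.Str.strip (PySem.Dict.getD ⟨entry⟩ "url" "")
  let doi :=
    if doi.toList = [] ∧ url.toList ≠ [] then
      let pos := PySem.Chars.find url.toList "doi.org/".toList
      if pos ≠ -1 then
        -- tail = url[pos + len("doi.org/"):]; doi = tail[:end] where end is the index of
        -- tail's first whitespace char (Source B's next(...)/slice pair = non-space prefix)
        let tail := PySem.List.slice url.toList (some (pos + 8)) none
        String.ofList (tail.takeWhile (fun c => !PySem.Chars.isspace c))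
      else doi
    else doi
  (doi, url, pvBNormalizeTitle (PySem.Dict.getD ⟨entry⟩ "title" ""))

-- ===== PRECONDITION & SPEC =====
def Spec_extract_identifiers (entry : List (String × String)) (out : String × String × String) : Prop := out = extract_identifiers_alt entry
instance (entry : List (String × String)) (out : String × String × String) : Decidable (Spec_extract_identifiers entry out) := by unfold Spec_extract_identifiers; infer_instance

-- ===== CLAIM (what is proved, stated in full; the proofs are below) =====
def Claim_equal_extract_identifiers : Prop := ∀ (entry : List (String × String)), Dom_extract_identifiers entry → Spec_extract_identifiers entry (extract_identifiers entry)

-- ===== LEMMAS AND PROOFS =====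
def pvNonbrace (c : Char) : Bool := c ≠ '{' && c ≠ '}'

-- the inner loop emits exactly the non-brace chars of the part it consumes
theorem pvAInner_spec : ∀ (t : List Char) (bc : Nat),
    (pvAInner t bc).1 ++ ((pvAInner t bc).2.filter pvNonbrace) = t.filter pvNonbrace := by
  intro t
  induction t with
  | nil => intro bc; simp [pvAInner]
  | cons c t ih =>
    intro bc
    simp only [pvAInner]
    split_ifs with h1 h2 h3
    · subst h1; simpa [pvNonbrace] using ih (bc + 1)
    · subst h2; simp [pvNonbrace]
    · subst h2; simpa [pvNonbrace] using ih (bc - 1)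
    · simp [pvNonbrace, h1, h2, ih bc]

-- A's whole brace state machine just deletes '{' and '}'
theorem pvAOuter_eq_filter (l : List Char) : pvAOuter l = l.filter pvNonbrace := by
  induction l using pvAOuter.induct with
  | case1 => simp [pvAOuter]
  | case2 t p ih =>
    simp only [pvAOuter]
    rw [ih]
    simpa [pvNonbrace] using pvAInner_spec t 1
  | case3 c t h1 h2 ih =>
    simp [pvAOuter, h1, h2, ih, pvNonbrace]
  | case4 c t h1 h2 ih =>
    simp at h2
    subst h2
    simp [pvAOuter, ih, pvNonbrace]

-- braces are neither alnum nor space, so the alnum/space filter subsumes the brace removal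
theorem pvClean_eq (l : List Char) :
    pvAClean (pvAOuter l) =
      (PySem.Chars.lower l).filter (fun c => PySem.Chars.isalnum c || PySem.Chars.isspace c) := by
  unfold pvAClean
  rw [PySem.List.foldl_append_if_eq_filter, pvAOuter_eq_filter]
  show List.filter _ (List.map _ _) = _
  simp only [PySem.Chars.lower]
  rw [List.filter_map, List.filter_map, List.filter_filter]
  congr 1
  apply List.filter_congr
  intro c _
  by_cases h1 : c = '{'
  · subst h1; decide
  · by_cases h2 : c = '}'
    · subst h2; decide
    · simp [pvNonbrace, h1, h2]

theorem pvNorm_eq (s : String) : pvANormalizeTitle s = pvBNormalizeTitle s := by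
  unfold pvANormalizeTitle pvBNormalizeTitle
  rw [pvClean_eq]

-- counting non-space chars then slicing = takeWhile
theorem pvScan_takeWhile (l : List Char) :
    l.take (pvAScan l) = l.takeWhile (fun c => !PySem.Chars.isspace c) := by
  induction l with
  | nil => simp [pvAScan]
  | cons c t ih =>
    simp only [pvAScan, List.takeWhile]
    by_cases h : PySem.Chars.isspace c <;> simp [h, ih]

theorem pvDoi_eq (url : List Char) (pos : Int) (hpos : 0 ≤ pos) :
    PySem.List.slice url (some (pos + 8)) (some (pos + 8 + (pvAScan (url.drop (pos + 8).toNat) : Int)))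
      = (PySem.List.slice url (some (pos + 8)) none).takeWhile (fun c => !PySem.Chars.isspace c) := by
  have ha : (0:Int) ≤ pos + 8 := by omega
  rw [PySem.List.slice_from url ha]
  set a := (pos + 8).toNat with hA
  have h1 : pos + 8 = (a : Int) := by omega
  rw [h1, ← Nat.cast_add, PySem.List.slice_natCast]
  rw [Nat.add_sub_cancel_left]
  exact pvScan_takeWhile _

-- ===== VERDICT (by name: the statement is the Claim_ definition above) =====
theorem extract_identifiers_spec : Claim_equal_extract_identifiers := by
  intro entry _
  show extract_identifiers entry = extract_identifiers_alt entry
  unfold extract_identifiers extract_identifiers_alt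
  simp only [Prod.mk.injEq]
  refine ⟨?_, trivial, pvNorm_eq _⟩
  split_ifs with h1 h2
  · have hpos : 0 ≤ PySem.Chars.find (PySem.Str.strip (PySem.Dict.getD ⟨entry⟩ "url" "")).toList "doi.org/".toList := by
      have := PySem.Chars.neg_one_le_find (PySem.Str.strip (PySem.Dict.getD ⟨entry⟩ "url" "")).toList "doi.org/".toList
      omega
    rw [pvDoi_eq _ _ hpos]
  · rfl
  · rfl
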